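-- pv_equiv track=rewrite | github.com/gcc17/dds | reduce_Bcost/plot_utils.py | sort_by_second_list
-- ===== SOURCE A (Python) =====
-- def sort_by_second_list(lista, listb):
--     if len(lista) * len(listb) == 0:
--         return lista, listb
--     zipped_ab = zip(lista, listb)
--     sort_zipped = sorted(zipped_ab, key=lambda x: (x[1], x[0]))
--     sort_result = zip(*sort_zipped)
--     x_axis, y_axis = [list(x) for x in sort_result]
--     return x_axis, y_axis
-- ===== SOURCE B (Python) =====
-- def _merge(l, r):
--     out = []
--     i = j = 0
--     while i < len(l) and j < len(r):
--         if (l[i][1], l[i][0]) <= (r[j][1], r[j][0]):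
--             out.append(l[i]); i += 1
--         else:
--             out.append(r[j]); j += 1
--     out.extend(l[i:])
--     out.extend(r[j:])
--     return out
--
--
-- def _msort(p):
--     if len(p) <= 1:
--         return p
--     mid = len(p) // 2
--     return _merge(_msort(p[:mid]), _msort(p[mid:]))
--
--
-- def sort_by_second_list(lista, listb):
--     if len(lista) * len(listb) == 0:
--         return lista, listb
--     pairs = _msort(list(zip(lista, listb)))
--     return [p[0] for p in pairs], [p[1] for p in pairs]
-- ===== Notes on version B (the rewrite author's own statement) =====
-- stated objective: alternative
-- what changed: B replaces the library stable sort of zipped pairs by a hand-written top-down merge sort (explicit divide, recursive halves, two-pointer merge on the (second, first) lexicographic key), then projects the two result lists; correct because the key determines the pair, so any sort agreeing with that order yields the same list.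
import Mathlib
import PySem

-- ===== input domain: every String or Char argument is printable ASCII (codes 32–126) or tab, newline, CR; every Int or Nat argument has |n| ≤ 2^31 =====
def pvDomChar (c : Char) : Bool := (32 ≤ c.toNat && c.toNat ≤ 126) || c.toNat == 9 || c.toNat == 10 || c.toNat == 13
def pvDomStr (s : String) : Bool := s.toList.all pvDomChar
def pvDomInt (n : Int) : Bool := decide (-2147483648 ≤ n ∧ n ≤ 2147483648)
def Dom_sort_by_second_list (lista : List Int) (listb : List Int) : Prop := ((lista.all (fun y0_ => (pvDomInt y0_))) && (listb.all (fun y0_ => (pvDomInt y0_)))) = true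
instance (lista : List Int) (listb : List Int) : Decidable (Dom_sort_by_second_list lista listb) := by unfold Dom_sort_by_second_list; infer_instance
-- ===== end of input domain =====

-- B replaces the library stable sort of the zipped pairs by a hand-written top-down merge
-- sort on the (second, first) lexicographic key (objective: alternative algorithm, same cost).

-- ===== PORT A =====
def sort_by_second_list (lista : List Int) (listb : List Int) : List Int × List Int :=
  if lista.length * listb.length = 0 then (lista, listb)
  else
    let zipped_ab := lista.zip listb
    let sort_zipped := PySem.List.sorted2 zipped_ab (fun x => x.2) (fun x => x.1) false
    -- zip(*sort_zipped) on a nonempty list of pairs yields the two component lists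
    (sort_zipped.map Prod.fst, sort_zipped.map Prod.snd)

-- ===== PORT B =====
-- (l[i][1], l[i][0]) <= (r[j][1], r[j][0]) : Python tuple comparison, lexicographic
def pvPairLe (p q : Int × Int) : Bool := p.2 < q.2 || (p.2 == q.2 && p.1 ≤ q.1)

def pvMerge : List (Int × Int) → List (Int × Int) → List (Int × Int)
  | [], r => r
  | l, [] => l
  | a :: l, b :: r =>
      if pvPairLe a b then a :: pvMerge l (b :: r) else b :: pvMerge (a :: l) r

def pvMsort (p : List (Int × Int)) : List (Int × Int) :=
  if _h : p.length ≤ 1 then p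
  else
    let mid := p.length / 2
    pvMerge (pvMsort (p.take mid)) (pvMsort (p.drop mid))
termination_by p.length
decreasing_by
  · simp [List.length_take]; omega
  · simp [List.length_drop]; omega

def sort_by_second_list_alt (lista : List Int) (listb : List Int) : List Int × List Int :=
  if lista.length * listb.length = 0 then (lista, listb)
  else
    let pairs := pvMsort (lista.zip listb)
    (pairs.map (fun p => p.1), pairs.map (fun p => p.2))

-- ===== PRECONDITION & SPEC =====
def Spec_sort_by_second_list (lista : List Int) (listb : List Int) (out : List Int × List Int) : Prop := out = sort_by_second_list_alt lista listb
instance (lista : List Int) (listb : List Int) (out : List Int × List Int) : Decidable (Spec_sort_by_second_list lista listb out) := by unfold Spec_sort_by_second_list; infer_instance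

-- ===== CLAIM =====
def Claim_equal_sort_by_second_list : Prop := ∀ (lista : List Int) (listb : List Int), Dom_sort_by_second_list lista listb → Spec_sort_by_second_list lista listb (sort_by_second_list lista listb)

-- ===== LEMMAS AND PROOFS =====

-- the common sort key: the Python tuple (x[1], x[0]) under lexicographic order
def pvKey (p : Int × Int) : Lex (Int × Int) := toLex (p.2, p.1)

theorem pvKey_injective : Function.Injective pvKey := by
  intro p q h
  unfold pvKey at h
  have := congrArg ofLex h
  simp at this
  exact Prod.ext this.2 this.1

theorem pvPairLe_eq_decide (p q : Int × Int) :
    pvPairLe p q = decide (pvKey p ≤ pvKey q) := by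
  unfold pvPairLe pvKey
  rw [Bool.eq_iff_iff]
  simp only [Bool.or_eq_true, Bool.and_eq_true, beq_iff_eq, decide_eq_true_iff,
    Prod.Lex.le_iff, ofLex_toLex]

theorem pvLt_eq_decide (p q : Int × Int) :
    (decide (p.2 < q.2) || (!decide (q.2 < p.2) && decide (p.1 < q.1)))
      = decide (pvKey p < pvKey q) := by
  unfold pvKey
  rw [Bool.eq_iff_iff]
  simp only [Bool.or_eq_true, Bool.and_eq_true, Bool.not_eq_true', decide_eq_true_iff,
    decide_eq_false_iff_not, Prod.Lex.lt_iff, ofLex_toLex]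
  omega

theorem pvMerge_perm (l r : List (Int × Int)) : (pvMerge l r).Perm (l ++ r) := by
  fun_induction pvMerge l r with
  | case1 r => simp
  | case2 l _ => simp
  | case3 a l b r h ih => exact ih.cons a
  | case4 a l b r h ih =>
      exact (ih.cons b).trans (List.perm_middle (a := b) (l₁ := a :: l) (l₂ := r)).symm

theorem pvMerge_pairwise (l r : List (Int × Int))
    (hl : l.Pairwise (fun a b => pvKey a ≤ pvKey b))
    (hr : r.Pairwise (fun a b => pvKey a ≤ pvKey b)) :
    (pvMerge l r).Pairwise (fun a b => pvKey a ≤ pvKey b) := by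
  fun_induction pvMerge l r with
  | case1 r => exact hr
  | case2 l _ => exact hl
  | case3 a l b r h ih =>
      rw [List.pairwise_cons] at hl
      have hab : pvKey a ≤ pvKey b :=
        of_decide_eq_true ((pvPairLe_eq_decide a b) ▸ h)
      rw [List.pairwise_cons] at hr
      rw [List.pairwise_cons]
      refine ⟨?_, ih hl.2 (List.pairwise_cons.mpr hr)⟩
      intro y hy
      have hmem := (pvMerge_perm l (b :: r)).mem_iff.mp hy
      simp only [List.mem_append, List.mem_cons] at hmem
      rcases hmem with h1 | h1 | h1
      · exact hl.1 y h1
      · exact h1 ▸ hab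
      · exact le_trans hab (hr.1 y h1)
  | case4 a l b r h ih =>
      have hba : pvKey b ≤ pvKey a := by
        have hd : ¬ pvKey a ≤ pvKey b := by
          intro hc
          exact h ((pvPairLe_eq_decide a b).symm ▸ decide_eq_true hc)
        exact le_of_not_ge hd
      rw [List.pairwise_cons] at hr
      rw [List.pairwise_cons]
      refine ⟨?_, ih hl hr.2⟩
      intro y hy
      have hmem := (pvMerge_perm (a :: l) r).mem_iff.mp hy
      simp only [List.mem_append, List.mem_cons] at hmem
      rcases hmem with (h1 | h1) | h1
      · exact h1 ▸ hba
      · rw [List.pairwise_cons] at hl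
        exact le_trans hba (hl.1 y h1)
      · exact hr.1 y h1

theorem pvMsort_perm (p : List (Int × Int)) : (pvMsort p).Perm p := by
  fun_induction pvMsort p with
  | case1 p h => exact List.Perm.refl p
  | case2 p h mid ih1 ih2 =>
      have hpm := (pvMerge_perm _ _).trans (ih1.append ih2)
      rwa [List.take_append_drop] at hpm

theorem pvMsort_pairwise (p : List (Int × Int)) :
    (pvMsort p).Pairwise (fun a b => pvKey a ≤ pvKey b) := by
  fun_induction pvMsort p with
  | case1 p h =>
      match p, h with
      | [], _ => simp
      | [a], _ => simp
  | case2 p h mid ih1 ih2 => exact pvMerge_pairwise _ _ ih1 ih2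

theorem foldl_insertBy_pairwise (xs acc : List (Int × Int))
    (hacc : acc.Pairwise (fun a b => pvKey a ≤ pvKey b)) :
    (List.foldl (fun acc x => PySem.List.insertBy (fun a b => decide (pvKey a < pvKey b)) x acc) acc xs).Pairwise
      (fun a b => pvKey a ≤ pvKey b) := by
  induction xs generalizing acc with
  | nil => exact hacc
  | cons x xs ih =>
      exact ih _ (PySem.List.insertBy_pairwise_le pvKey x acc hacc)

theorem sorted2_eq_foldl (xs : List (Int × Int)) :
    PySem.List.sorted2 xs (fun x => x.2) (fun x => x.1) false
      = List.foldl (fun acc x => PySem.List.insertBy (fun a b => decide (pvKey a < pvKey b)) x acc) [] xs := by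
  unfold PySem.List.sorted2
  simp only [Bool.false_eq_true, if_false]
  congr 1
  funext acc x
  congr 1
  funext a b
  exact pvLt_eq_decide a b

theorem sorted2_pairwise_key (xs : List (Int × Int)) :
    (PySem.List.sorted2 xs (fun x => x.2) (fun x => x.1) false).Pairwise
      (fun a b => pvKey a ≤ pvKey b) := by
  rw [sorted2_eq_foldl]
  exact foldl_insertBy_pairwise xs [] (by simp)

theorem sorted2_eq_msort (xs : List (Int × Int)) :
    PySem.List.sorted2 xs (fun x => x.2) (fun x => x.1) false = pvMsort xs := by
  refine PySem.List.eq_of_perm_of_pairwise_le_of_injective pvKey pvKey_injective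
    ?_ (sorted2_pairwise_key xs) (pvMsort_pairwise xs)
  exact (PySem.List.sorted2_perm xs _ _ false).trans (pvMsort_perm xs).symm

theorem ports_agree (lista listb : List Int) :
    sort_by_second_list lista listb = sort_by_second_list_alt lista listb := by
  unfold sort_by_second_list sort_by_second_list_alt
  by_cases h : lista.length * listb.length = 0
  · simp [h]
  · simp only [h, if_false, sorted2_eq_msort]

-- ===== VERDICT =====
theorem sort_by_second_list_spec : Claim_equal_sort_by_second_list := by
  intro lista listb _
  unfold Spec_sort_by_second_list
  exact ports_agree lista listb
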